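-- pv_equiv track=rewrite | github.com/Kiadttiphoom/sbl-backend-ai | core/ai_controller.py | _extract_session_state
-- ===== SOURCE A (Python) =====
-- from typing import AsyncGenerator, Dict, Any, List, Optional, Tuple
--
-- def _extract_session_state(history: List[Dict[str, str]]) -> Dict[str, Any]:
--     """
--     ดึง last_sql และ last_db จาก history
--     Frontend ควรส่ง special message: {"role": "system", "content": "__sql__:<sql>", "db": "<db>"}
--     ถ้าไม่มี → fallback ดึง SQL จาก event ใน content string แทน
--     """
--     for m in reversed(history):
--         role = m.get("role", "")
--         content = m.get("content", "")
--         # รูปแบบ 1: system message พิเศษที่ frontend inject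
--         if role == "system" and content.startswith("__sql__:"):
--             sql = content[len("__sql__:"):]
--             db  = m.get("db", "lspdata")
--             return {"last_sql": sql.strip(), "last_db": db}
--         # รูปแบบ 2: assistant message ที่มี SQL ฝังอยู่ (จาก event sql)
--         if role == "assistant" and "__last_sql__:" in content:
--             parts = content.split("__last_sql__:")
--             if len(parts) > 1:
--                 sql_part = parts[1].split("__end_sql__")[0].strip()
--                 return {"last_sql": sql_part, "last_db": "lspdata"}
--     return {"last_sql": None, "last_db": "lspdata"}
-- ===== SOURCE B (Python) =====
-- from typing import Dict, Any, List
--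
-- def _sys_marked(m: Dict[str, str]) -> bool:
--     return m.get("role", "") == "system" and m.get("content", "").startswith("__sql__:")
--
-- def _asst_marked(m: Dict[str, str]) -> bool:
--     return m.get("role", "") == "assistant" and "__last_sql__:" in m.get("content", "")
--
-- def _extract_session_state(history: List[Dict[str, str]]) -> Dict[str, Any]:
--     sys_idx = -1
--     asst_idx = -1
--     for i, m in enumerate(history):
--         if _sys_marked(m):
--             sys_idx = i
--         if _asst_marked(m):
--             asst_idx = i
--     if sys_idx > asst_idx:
--         m = history[sys_idx]
--         return {"last_sql": m.get("content", "")[len("__sql__:"):].strip(),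
--                 "last_db": m.get("db", "lspdata")}
--     if asst_idx >= 0:
--         content = history[asst_idx].get("content", "")
--         sql = content.split("__last_sql__:")[1].split("__end_sql__")[0].strip()
--         return {"last_sql": sql, "last_db": "lspdata"}
--     return {"last_sql": None, "last_db": "lspdata"}
-- ===== Notes on version B (the rewrite author's own statement) =====
-- stated objective: alternative
-- what changed: Replaces A's reversed scan with early return by a single forward index scan that records the last index of a system __sql__ message and the last index of an assistant __last_sql__ message, then parses only the message at the winning (larger) index after the loop.
import Mathlib
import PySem

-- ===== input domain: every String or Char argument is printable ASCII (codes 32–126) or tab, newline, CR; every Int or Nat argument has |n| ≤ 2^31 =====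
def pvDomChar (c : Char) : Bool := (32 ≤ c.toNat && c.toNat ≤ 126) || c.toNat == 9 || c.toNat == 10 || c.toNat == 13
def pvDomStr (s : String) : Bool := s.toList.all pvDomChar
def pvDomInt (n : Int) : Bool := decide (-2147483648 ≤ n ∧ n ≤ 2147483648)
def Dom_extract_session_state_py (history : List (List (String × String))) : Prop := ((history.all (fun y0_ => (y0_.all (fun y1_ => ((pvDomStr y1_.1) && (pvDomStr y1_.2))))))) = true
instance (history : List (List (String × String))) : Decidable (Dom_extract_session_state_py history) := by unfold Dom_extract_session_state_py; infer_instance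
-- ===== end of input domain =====

-- B replaces A's reversed-scan-with-early-return by one forward index scan recording the last matching
-- index of each message kind, then parses only the winning message; objective: alternative decomposition.

-- ===== PORT A =====
-- the 'for m in reversed(history)' loop with its early returns, as recursion over the reversed list
def pvGoA : List (List (String × String)) → List (String × Option String)
  | [] => [("last_sql", none), ("last_db", some "lspdata")]
  | m :: rest =>
    let role := (PySem.Dict.mk m).getD "role" ""
    let content := (PySem.Dict.mk m).getD "content" ""
    if role == "system" && PySem.Str.startswith content "__sql__:" then
      let sql := PySem.Str.slice content (some 8) none
      let db := (PySem.Dict.mk m).getD "db" "lspdata"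
      [("last_sql", some (PySem.Str.strip sql)), ("last_db", some db)]
    else if role == "assistant" && PySem.Str.isIn "__last_sql__:" content then
      let parts := (PySem.Str.split? content "__last_sql__:").getD []
      if parts.length > 1 then
        let sql_part := PySem.Str.strip (PySem.List.pyGetD (((PySem.Str.split? (PySem.List.pyGetD parts 1 "") "__end_sql__").getD [])) 0 "")
        [("last_sql", some sql_part), ("last_db", some "lspdata")]
      else pvGoA rest
    else pvGoA rest

def extract_session_state_py (history : List (List (String × String))) : List (String × Option String) :=
  pvGoA history.reverse

-- ===== PORT B =====
-- _sys_marked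
def pvSysMarked (m : List (String × String)) : Bool :=
  ((PySem.Dict.mk m).getD "role" "" == "system") &&
    PySem.Str.startswith ((PySem.Dict.mk m).getD "content" "") "__sql__:"

-- _asst_marked
def pvAsstMarked (m : List (String × String)) : Bool :=
  ((PySem.Dict.mk m).getD "role" "" == "assistant") &&
    PySem.Str.isIn "__last_sql__:" ((PySem.Dict.mk m).getD "content" "")

-- the 'for i, m in enumerate(history)' loop keeping (sys_idx, asst_idx)
def pvScan : List (List (String × String)) → Int → Int × Int → Int × Int
  | [], _, st => st
  | m :: rest, i, st =>
    pvScan rest (i + 1)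
      ((if pvSysMarked m then i else st.1), (if pvAsstMarked m then i else st.2))

def extract_session_state_py_alt (history : List (List (String × String))) : List (String × Option String) :=
  let st := pvScan history 0 (-1, -1)
  if st.1 > st.2 then
    let m := (PySem.List.pyGet? history st.1).getD []
    [("last_sql", some (PySem.Str.strip (PySem.Str.slice ((PySem.Dict.mk m).getD "content" "") (some 8) none))),
     ("last_db", some ((PySem.Dict.mk m).getD "db" "lspdata"))]
  else if st.2 ≥ 0 then
    let content := (PySem.Dict.mk ((PySem.List.pyGet? history st.2).getD [])).getD "content" ""
    let sql := PySem.Str.strip (PySem.List.pyGetD (((PySem.Str.split? (PySem.List.pyGetD ((PySem.Str.split? content "__last_sql__:").getD []) 1 "") "__end_sql__").getD [])) 0 "")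
    [("last_sql", some sql), ("last_db", some "lspdata")]
  else [("last_sql", none), ("last_db", some "lspdata")]

-- ===== PRECONDITION & SPEC =====
def Spec_extract_session_state_py (history : List (List (String × String))) (out : List (String × Option String)) : Prop := out = extract_session_state_py_alt history
instance (history : List (List (String × String))) (out : List (String × Option String)) : Decidable (Spec_extract_session_state_py history out) := by unfold Spec_extract_session_state_py; infer_instance

-- ===== CLAIM (what is proved, stated in full; the proofs are below) =====
def Claim_equal_extract_session_state_py : Prop := ∀ (history : List (List (String × String))), Dom_extract_session_state_py history → Spec_extract_session_state_py history (extract_session_state_py history)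

-- ===== LEMMAS AND PROOFS =====

-- splitOn's worker yields at least one piece beyond the accumulator
theorem pvGoLen1 (sep : List Char) : ∀ (fuel : Nat) (l cur : List Char) (acc : List (List Char)),
    acc.length + 1 ≤ (PySem.Chars.splitOn.go sep fuel l cur acc).length := by
  intro fuel
  induction fuel with
  | zero => intro l cur acc; simp [PySem.Chars.splitOn.go]
  | succ n ih =>
    intro l cur acc
    cases l with
    | nil => simp [PySem.Chars.splitOn.go]
    | cons c rest =>
      rw [PySem.Chars.splitOn.go]
      split
      · exact le_trans (by simp) (ih _ _ _)
      · exact ih _ _ _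

-- and at least two pieces when sep occurs in l
theorem pvGoLen2 (sep : List Char) (hsep : sep ≠ []) :
    ∀ (fuel : Nat) (l cur : List Char) (acc : List (List Char)), sep <:+: l → l.length ≤ fuel →
    acc.length + 2 ≤ (PySem.Chars.splitOn.go sep fuel l cur acc).length := by
  intro fuel
  induction fuel with
  | zero =>
    intro l cur acc hinf hlen
    interval_cases hl : l.length
    · rw [List.length_eq_zero_iff] at hl; subst hl
      simp at hinf; exact absurd hinf hsep
  | succ n ih =>
    intro l cur acc hinf hlen
    cases l with
    | nil => simp at hinf; exact absurd hinf hsep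
    | cons c rest =>
      rw [PySem.Chars.splitOn.go]
      split
      · have := pvGoLen1 sep n (List.drop sep.length (c :: rest)) [] (cur.reverse :: acc)
        simp at this ⊢
        omega
      · rename_i hnp
        have : sep <:+: rest := by
          rcases List.infix_cons_iff.mp hinf with h | h
          · exact absurd (List.isPrefixOf_iff_prefix.mpr h) (by simpa using hnp)
          · exact h
        exact ih rest (c :: cur) acc this (by simpa using Nat.lt_succ_iff.mp (by simpa using hlen))

-- 'sub in s' guarantees s.split(sub) has at least two parts (A's inner guard always fires)
theorem pvSplitTwo (s sub : String) (hsub : sub.toList ≠ [])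
    (h : PySem.Str.isIn sub s = true) :
    1 < ((PySem.Str.split? s sub).getD []).length := by
  have hinf : sub.toList <:+: s.toList := (PySem.Str.isIn_iff_infix sub s).mp h
  have h2 := pvGoLen2 sub.toList hsub (s.toList.length + 1) s.toList [] [] hinf (by omega)
  simp [PySem.Str.split?, PySem.Chars.split?, hsub, PySem.Chars.splitOn] at h2 ⊢
  omega

-- a message cannot be both system- and assistant-marked
theorem pvMarkedExcl (m : List (String × String)) :
    pvSysMarked m = true → pvAsstMarked m = false := by
  simp [pvSysMarked, pvAsstMarked]
  intro h _
  simp [h]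

-- pvScan splits over append
theorem pvScan_append (xs ys : List (List (String × String))) (i : Int) (st : Int × Int) :
    pvScan (xs ++ ys) i st = pvScan ys (i + xs.length) (pvScan xs i st) := by
  induction xs generalizing i st with
  | nil => simp [pvScan]
  | cons m rest ih =>
    simp only [List.cons_append, pvScan, ih]
    congr 1
    simp only [List.length_cons]
    push_cast
    ring

-- pvScan keeps both indices in [-1, i + length)
theorem pvScan_bounds : ∀ (l : List (List (String × String))) (i : Int) (st : Int × Int),
    -1 ≤ st.1 → st.1 < i → -1 ≤ st.2 → st.2 < i →
    (-1 ≤ (pvScan l i st).1 ∧ (pvScan l i st).1 < i + l.length ∧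
     -1 ≤ (pvScan l i st).2 ∧ (pvScan l i st).2 < i + l.length) := by
  intro l
  induction l with
  | nil => intro i st h1 h2 h3 h4; simp [pvScan]; omega
  | cons m rest ih =>
    intro i st h1 h2 h3 h4
    simp only [pvScan, List.length_cons]
    have := ih (i + 1) ((if pvSysMarked m then i else st.1), (if pvAsstMarked m then i else st.2))
      (by dsimp; split <;> omega) (by dsimp; split <;> omega)
      (by dsimp; split <;> omega) (by dsimp; split <;> omega)
    push_cast at this ⊢
    omega

-- appending one element does not change lookups strictly below the old length
theorem pvGetAppend {α : Type} (l : List α) (m : α) (k : Int) (h0 : 0 ≤ k) (h1 : k < l.length) :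
    PySem.List.pyGet? (l ++ [m]) k = PySem.List.pyGet? l k := by
  obtain ⟨n, rfl⟩ : ∃ n : Nat, (n : Int) = k := ⟨k.toNat, Int.toNat_of_nonneg h0⟩
  rw [PySem.List.pyGet?_natCast, PySem.List.pyGet?_natCast,
    List.getElem?_append_left (by exact_mod_cast h1)]

-- the main induction: one reverse step of A matches one forward step of B's scan
theorem pvMain (l : List (List (String × String))) :
    pvGoA l.reverse = extract_session_state_py_alt l := by
  induction l using List.reverseRecOn with
  | nil => rfl
  | append_singleton l m ih =>
    have hb := pvScan_bounds l 0 (-1, -1) (by norm_num) (by norm_num) (by norm_num) (by norm_num)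
    simp only [zero_add] at hb
    have hscan : pvScan (l ++ [m]) 0 (-1, -1) =
        ((if pvSysMarked m then (l.length : Int) else (pvScan l 0 (-1, -1)).1),
         (if pvAsstMarked m then (l.length : Int) else (pvScan l 0 (-1, -1)).2)) := by
      rw [pvScan_append]
      simp [pvScan]
    rw [List.reverse_append]
    simp only [List.reverse_singleton, List.singleton_append]
    by_cases hs : pvSysMarked m = true
    · have ha := pvMarkedExcl m hs
      have hs' : ((PySem.Dict.mk m).getD "role" "" == "system" &&
          PySem.Str.startswith ((PySem.Dict.mk m).getD "content" "") "__sql__:") = true := hs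
      have hget : PySem.List.pyGet? (l ++ [m]) ((l.length : Nat) : Int) = some m := by
        rw [PySem.List.pyGet?_natCast, List.getElem?_concat_length]
      simp only [pvGoA, extract_session_state_py_alt, hscan, hs, ha, if_true, if_false,
        Bool.false_eq_true, hs']
      rw [if_pos (by omega), hget]
      simp only [Option.getD_some]
    · by_cases ha : pvAsstMarked m = true
      · have ha' : ((PySem.Dict.mk m).getD "role" "" == "assistant" &&
            PySem.Str.isIn "__last_sql__:" ((PySem.Dict.mk m).getD "content" "")) = true := ha
        have hs' : ((PySem.Dict.mk m).getD "role" "" == "system" &&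
            PySem.Str.startswith ((PySem.Dict.mk m).getD "content" "") "__sql__:") = false := by
          simpa [pvSysMarked] using hs
        have hparts : 1 < ((PySem.Str.split? ((PySem.Dict.mk m).getD "content" "") "__last_sql__:").getD []).length := by
          apply pvSplitTwo _ _ (by decide)
          have ha2 := ha
          rw [pvAsstMarked, Bool.and_eq_true] at ha2
          exact ha2.2
        have hget : PySem.List.pyGet? (l ++ [m]) ((l.length : Nat) : Int) = some m := by
          rw [PySem.List.pyGet?_natCast, List.getElem?_concat_length]
        simp only [pvGoA, extract_session_state_py_alt, hscan, ha, hs, if_true, if_false,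
          Bool.false_eq_true, hs', ha']
        rw [if_pos hparts, if_neg (by omega), if_pos (by positivity), hget]
        simp only [Option.getD_some]
      · have hs' : ((PySem.Dict.mk m).getD "role" "" == "system" &&
            PySem.Str.startswith ((PySem.Dict.mk m).getD "content" "") "__sql__:") = false := by
          simpa [pvSysMarked] using hs
        have ha' : ((PySem.Dict.mk m).getD "role" "" == "assistant" &&
            PySem.Str.isIn "__last_sql__:" ((PySem.Dict.mk m).getD "content" "")) = false := by
          simpa [pvAsstMarked] using ha
        simp only [pvGoA, hs', ha', Bool.false_eq_true, if_false]
        rw [ih]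
        simp only [extract_session_state_py_alt, hscan, hs, ha, Bool.false_eq_true, if_false]
        by_cases h1 : (pvScan l 0 (-1, -1)).1 > (pvScan l 0 (-1, -1)).2
        · rw [if_pos h1, if_pos h1, pvGetAppend _ _ _ (by omega) (by omega)]
        · rw [if_neg h1, if_neg h1]
          by_cases h2 : (pvScan l 0 (-1, -1)).2 ≥ 0
          · rw [if_pos h2, if_pos h2, pvGetAppend _ _ _ (by omega) (by omega)]
          · rw [if_neg h2, if_neg h2]

-- ===== VERDICT (by name: the statement is the Claim_ definition above) =====
theorem extract_session_state_py_spec : Claim_equal_extract_session_state_py := by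
  intro history _
  exact pvMain history
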